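-- pv_equiv track=rewrite | github.com/sarthak-egenome/bloodpdf_parser | src/bloodparser/extract.py | _header_indices
-- ===== SOURCE A (Python) =====
-- from typing import List, Dict, Tuple, Optional
--
-- def _header_indices(rows: List[List[str]]):
--     header_idx = None
--     cols = {}
--     for i, row in enumerate(rows[:5]):
--         lowered = [c.lower() for c in row]
--         got = {"test": None, "result": None, "unit": None}
--         for j, cell in enumerate(lowered):
--             if "test" in cell or "investigation" in cell or "parameter" in cell:
--                 got["test"] = got["test"] if got["test"] is not None else j
--             if "result" in cell or "value" in cell:
--                 got["result"] = got["result"] if got["result"] is not None else j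
--             if "unit" in cell or "units" in cell:
--                 got["unit"] = got["unit"] if got["unit"] is not None else j
--         if all(v is not None for v in got.values()):
--             header_idx = i
--             cols = got
--             return header_idx, cols
--     return None, {}
-- ===== SOURCE B (Python) =====
-- def _header_indices(rows):
--     for i, row in enumerate(rows[:5]):
--         lowered = [c.lower() for c in row]
--         t = next((j for j, cell in enumerate(lowered)
--                   if "test" in cell or "investigation" in cell or "parameter" in cell), None)
--         r = next((j for j, cell in enumerate(lowered)
--                   if "result" in cell or "value" in cell), None)
--         u = next((j for j, cell in enumerate(lowered) if "unit" in cell), None)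
--         if t is not None and r is not None and u is not None:
--             return i, {"test": t, "result": r, "unit": u}
--     return None, {}
-- ===== Notes on version B (the rewrite author's own statement) =====
-- stated objective: simpler
-- what changed: Replaces the fused inner loop with mutable first-wins dict bookkeeping by three independent first-match scans (next over a generator) per row, returning the dict directly when all three are found.
import Mathlib
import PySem

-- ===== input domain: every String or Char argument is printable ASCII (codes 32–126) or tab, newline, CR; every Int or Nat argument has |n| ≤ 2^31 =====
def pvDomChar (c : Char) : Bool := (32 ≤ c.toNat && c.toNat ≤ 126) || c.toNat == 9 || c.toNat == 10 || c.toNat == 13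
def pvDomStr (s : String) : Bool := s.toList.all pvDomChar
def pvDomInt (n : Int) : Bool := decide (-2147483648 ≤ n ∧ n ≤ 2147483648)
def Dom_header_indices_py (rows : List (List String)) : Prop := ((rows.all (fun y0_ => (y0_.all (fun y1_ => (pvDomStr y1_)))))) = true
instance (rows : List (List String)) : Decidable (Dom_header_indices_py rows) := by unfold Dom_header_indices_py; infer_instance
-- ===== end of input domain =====

-- B differs from A by computing the three column indices with three independent
-- first-match scans per row instead of A's fused inner loop with first-wins dict
-- bookkeeping (objective: simpler).

-- ===== PORT A =====
-- the three membership tests of A's inner loop, in A's order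
def hiTestA (cell : String) : Bool :=
  PySem.Str.isIn "test" cell || PySem.Str.isIn "investigation" cell || PySem.Str.isIn "parameter" cell
def hiResultA (cell : String) : Bool :=
  PySem.Str.isIn "result" cell || PySem.Str.isIn "value" cell
def hiUnitA (cell : String) : Bool :=
  PySem.Str.isIn "unit" cell || PySem.Str.isIn "units" cell

-- one iteration of A's inner 'for j, cell in enumerate(lowered)' loop over the dict 'got'
def hiStepA (got : PySem.Dict String (Option Int)) (jc : Int × String) : PySem.Dict String (Option Int) :=
  let got := if hiTestA jc.2 then
      got.insert "test" (let cur := got.getD "test" none; if cur.isSome then cur else some jc.1)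
    else got
  let got := if hiResultA jc.2 then
      got.insert "result" (let cur := got.getD "result" none; if cur.isSome then cur else some jc.1)
    else got
  if hiUnitA jc.2 then
      got.insert "unit" (let cur := got.getD "unit" none; if cur.isSome then cur else some jc.1)
    else got

-- A's outer 'for i, row in enumerate(rows[:5])' loop with its early return
def hiGoA : Int → List (List String) → Option Int × (List (String × Option Int))
  | _, [] => (none, [])
  | i, row :: rest =>
    let lowered := row.map PySem.Str.lower
    let got0 : PySem.Dict String (Option Int) :=
      PySem.Dict.ofList [("test", none), ("result", none), ("unit", none)]
    let got := (PySem.List.enumerate lowered).foldl hiStepA got0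
    if got.values.all (fun v => v.isSome) then (some i, got.items) else hiGoA (i + 1) rest

def header_indices_py (rows : List (List String)) : Option Int × (List (String × Option Int)) :=
  hiGoA 0 (PySem.List.slice rows none (some 5))

-- ===== PORT B =====
def hiTestB (cell : String) : Bool :=
  PySem.Str.isIn "test" cell || PySem.Str.isIn "investigation" cell || PySem.Str.isIn "parameter" cell
def hiResultB (cell : String) : Bool :=
  PySem.Str.isIn "result" cell || PySem.Str.isIn "value" cell
def hiUnitB (cell : String) : Bool :=
  PySem.Str.isIn "unit" cell

-- next((j for j, cell in enumerate(lowered) if p(cell)), None)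
def hiFirst (p : String → Bool) (j : Int) : List String → Option Int
  | [] => none
  | c :: cs => if p c then some j else hiFirst p (j + 1) cs

def hiGoB : Int → List (List String) → Option Int × (List (String × Option Int))
  | _, [] => (none, [])
  | i, row :: rest =>
    let lowered := row.map PySem.Str.lower
    match hiFirst hiTestB 0 lowered, hiFirst hiResultB 0 lowered, hiFirst hiUnitB 0 lowered with
    | some t, some r, some u => (some i, [("test", some t), ("result", some r), ("unit", some u)])
    | _, _, _ => hiGoB (i + 1) rest

def header_indices_py_alt (rows : List (List String)) : Option Int × (List (String × Option Int)) :=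
  hiGoB 0 (PySem.List.slice rows none (some 5))

-- ===== PRECONDITION & SPEC =====
def Spec_header_indices_py (rows : List (List String)) (out : Option Int × (List (String × Option Int))) : Prop := out = header_indices_py_alt rows
instance (rows : List (List String)) (out : Option Int × (List (String × Option Int))) : Decidable (Spec_header_indices_py rows out) := by unfold Spec_header_indices_py; infer_instance

-- ===== CLAIM (what is proved, stated in full; the proofs are below) =====
def Claim_equal_header_indices_py : Prop := ∀ (rows : List (List String)), Dom_header_indices_py rows → Spec_header_indices_py rows (header_indices_py rows)

-- ===== LEMMAS AND PROOFS =====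

-- 'units' in cell implies 'unit' in cell, so A's unit test equals B's
lemma hiUnit_eq : hiUnitA = hiUnitB := by
  funext c
  cases h : PySem.Str.isIn "units" c
  · simp only [hiUnitA, hiUnitB, h, Bool.or_false]
  · have h1 : PySem.Str.isIn "unit" c = true :=
      (PySem.Str.isIn_iff_infix "unit" c).2
        ((by decide : "unit".toList <:+: "units".toList).trans
          ((PySem.Str.isIn_iff_infix "units" c).1 h))
    simp only [hiUnitA, hiUnitB, h, h1, Bool.or_true, Bool.true_or]

lemma hiTest_eq : hiTestA = hiTestB := by funext c; simp [hiTestA, hiTestB]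

lemma hiResult_eq : hiResultA = hiResultB := by funext c; simp [hiResultA, hiResultB]

-- one step of A's inner loop on the canonical 3-entry dict
lemma hiStepA_eq (t r u : Option Int) (j : Int) (c : String) :
    hiStepA (PySem.Dict.mk [("test", t), ("result", r), ("unit", u)]) (j, c) =
      PySem.Dict.mk
        [("test", if hiTestA c then (if t.isSome then t else some j) else t),
         ("result", if hiResultA c then (if r.isSome then r else some j) else r),
         ("unit", if hiUnitA c then (if u.isSome then u else some j) else u)] := by
  by_cases h1 : hiTestA c <;> by_cases h2 : hiResultA c <;> by_cases h3 : hiUnitA c <;>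
    simp [hiStepA, h1, h2, h3, PySem.Dict.insert, PySem.Dict.getD, PySem.Dict.get?,
      PySem.Dict.contains]

-- absorbing one first-wins step into the first-match scan
lemma hiOr_step (p : String → Bool) (t : Option Int) (j : Int) (c : String) (cs : List String) :
    (if p c then (if t.isSome then t else some j) else t).or (hiFirst p (j + 1) cs) =
      t.or (hiFirst p j (c :: cs)) := by
  cases t <;> by_cases h : p c <;> simp [hiFirst, h, Option.or]

-- A's whole inner loop computes the three first matches independently
lemma hiFoldA_eq (l : List String) (j : Int) (t r u : Option Int) :
    (PySem.List.enumerate l j).foldl hiStepA (PySem.Dict.mk [("test", t), ("result", r), ("unit", u)]) =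
      PySem.Dict.mk
        [("test", t.or (hiFirst hiTestA j l)), ("result", r.or (hiFirst hiResultA j l)),
         ("unit", u.or (hiFirst hiUnitA j l))] := by
  induction l generalizing j t r u with
  | nil => simp [PySem.List.enumerate_nil, hiFirst]
  | cons c cs ih =>
    rw [PySem.List.enumerate_cons, List.foldl_cons, hiStepA_eq, ih,
      hiOr_step, hiOr_step, hiOr_step]

lemma hiGo_eq (l : List (List String)) (i : Int) : hiGoA i l = hiGoB i l := by
  induction l generalizing i with
  | nil => rfl
  | cons row rest ih =>
    rw [hiGoA, hiGoB]
    have h0 : (PySem.Dict.ofList [("test", (none : Option Int)), ("result", none), ("unit", none)])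
        = PySem.Dict.mk [("test", none), ("result", none), ("unit", none)] := by decide
    simp only [h0, hiFoldA_eq, hiTest_eq, hiResult_eq, hiUnit_eq, Option.none_or]
    rcases hT : hiFirst hiTestB 0 (row.map PySem.Str.lower) with _ | t <;>
      rcases hR : hiFirst hiResultB 0 (row.map PySem.Str.lower) with _ | r <;>
      rcases hU : hiFirst hiUnitB 0 (row.map PySem.Str.lower) with _ | u <;>
      simp [PySem.Dict.values, PySem.Dict.items, hT, hR, hU, ih]

-- ===== VERDICT (by name: the statement is the Claim_ definition above) =====
theorem header_indices_py_spec : Claim_equal_header_indices_py := by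
  intro rows _
  unfold Spec_header_indices_py header_indices_py header_indices_py_alt
  exact hiGo_eq _ 0
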